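-- pv_equiv track=rewrite | github.com/psanjay679/Programming-Questions | GFG/posSubseq.py | cntPosSS
-- ===== SOURCE A (Python) =====
-- def cntPosSS(ar):
--
--
--     pos = 0
--     neg = 0
--
--     for i in range(len(ar)):
--         if ar[i] < 0:
--             neg += 1
--         elif ar[i] > 0:
--             pos += 1
--
--     if neg == 0:
--         return (2 ** pos - 1) % 1000000007
--     if pos == 0:
--         return (2 ** (neg - 1) - 1) % 1000000007
--     else:
--         ps = 2 ** pos - 1
--         pn = 2 ** pos * (2 ** (neg - 1) - 1)
--
--         return (ps + pn) % 1000000007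
-- ===== SOURCE B (Python) =====
-- def cntPosSS(ar):
--     # Single-pass DP: maintain counts (mod 1e9+7) of nonempty subsequences seen so far
--     # whose product is positive (pos) / negative (neg); zeros contribute nothing.
--     MOD = 1000000007
--     pos = 0
--     neg = 0
--     for x in ar:
--         if x > 0:
--             pos, neg = (2 * pos + 1) % MOD, (2 * neg) % MOD
--         elif x < 0:
--             pos, neg = (pos + neg) % MOD, (pos + neg + 1) % MOD
--     return pos
-- ===== Notes on version B (the rewrite author's own statement) =====
-- stated objective: alternative
-- what changed: B replaces A's count-signs-then-closed-form-powers approach by a single-pass dynamic program that maintains modular counts of subsequences with positive and negative product, updating both counts at each element and never computing any power of 2.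
import Mathlib
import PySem

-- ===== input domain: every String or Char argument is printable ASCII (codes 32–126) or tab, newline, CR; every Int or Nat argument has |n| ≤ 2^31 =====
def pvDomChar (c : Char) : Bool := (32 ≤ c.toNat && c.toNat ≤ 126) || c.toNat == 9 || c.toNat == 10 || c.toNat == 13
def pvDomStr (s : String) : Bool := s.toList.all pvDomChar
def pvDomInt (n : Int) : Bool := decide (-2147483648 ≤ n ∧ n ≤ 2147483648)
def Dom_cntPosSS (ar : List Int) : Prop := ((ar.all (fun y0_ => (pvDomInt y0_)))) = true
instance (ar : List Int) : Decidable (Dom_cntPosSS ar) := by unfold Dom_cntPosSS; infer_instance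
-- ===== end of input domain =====

-- B is a single-pass DP maintaining modular counts of positive- and negative-product
-- subsequences, instead of A's sign counting followed by closed-form powers of two
-- (objective: alternative algorithm, similar cost).

-- ===== PORT A =====
def cntPosSS (ar : List Int) : Int :=
  -- the loop over range(len(ar)) reads ar[i] for each index in order: fold over the elements
  let st := ar.foldl (fun (st : Nat × Nat) x =>
      if x < 0 then (st.1, st.2 + 1)
      else if x > 0 then (st.1 + 1, st.2)
      else st) (0, 0)
  let pos := st.1
  let neg := st.2
  if neg = 0 then PySem.Int.mod ((2:Int)^pos - 1) 1000000007
  else if pos = 0 then PySem.Int.mod ((2:Int)^(neg - 1) - 1) 1000000007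
  else
    let ps := (2:Int)^pos - 1
    let pn := (2:Int)^pos * ((2:Int)^(neg - 1) - 1)
    PySem.Int.mod (ps + pn) 1000000007

-- ===== PORT B =====
-- step of the DP loop body of Source B, state = (pos, neg)
def pvStep (st : Int × Int) (x : Int) : Int × Int :=
  if x > 0 then
    (PySem.Int.mod (2 * st.1 + 1) 1000000007, PySem.Int.mod (2 * st.2) 1000000007)
  else if x < 0 then
    (PySem.Int.mod (st.1 + st.2) 1000000007, PySem.Int.mod (st.1 + st.2 + 1) 1000000007)
  else st

def cntPosSS_alt (ar : List Int) : Int :=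
  (ar.foldl pvStep (0, 0)).1

-- ===== PRECONDITION & SPEC =====
def Spec_cntPosSS (ar : List Int) (out : Int) : Prop := out = cntPosSS_alt ar
instance (ar : List Int) (out : Int) : Decidable (Spec_cntPosSS ar out) := by unfold Spec_cntPosSS; infer_instance

-- ===== CLAIM (what is proved, stated in full; the proofs are below) =====
def Claim_equal_cntPosSS : Prop := ∀ (ar : List Int), Dom_cntPosSS ar → Spec_cntPosSS ar (cntPosSS ar)

-- ===== LEMMAS AND PROOFS =====

-- ===== VERDICT (by name: the statement is the Claim_ definition above) =====
-- closed forms for the DP state after seeing p positives and n negatives (any zeros)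
def pvP (p n : Nat) : Int := if n = 0 then 2 ^ p - 1 else 2 ^ (p + n - 1) - 1
def pvN (p n : Nat) : Int := if n = 0 then 0 else 2 ^ (p + n - 1)

theorem pv_mod_emod (a : Int) : PySem.Int.mod a 1000000007 = a % 1000000007 :=
  PySem.Int.mod_eq_emod_of_pos (by norm_num)

theorem pv_modeq (a : Int) : a % 1000000007 ≡ a [ZMOD 1000000007] :=
  Int.emod_emod_of_dvd a dvd_rfl

theorem pv_mod_add (a b : Int) :
    (a % 1000000007 + b % 1000000007) % 1000000007 = (a + b) % 1000000007 :=
  (pv_modeq a).add (pv_modeq b)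

theorem pv_mod_add1 (a b : Int) :
    (a % 1000000007 + b % 1000000007 + 1) % 1000000007 = (a + b + 1) % 1000000007 :=
  ((pv_modeq a).add (pv_modeq b)).add_right 1

theorem pv_mod_two_add1 (a : Int) :
    (2 * (a % 1000000007) + 1) % 1000000007 = (2 * a + 1) % 1000000007 :=
  ((pv_modeq a).mul_left 2).add_right 1

theorem pv_mod_two (a : Int) :
    (2 * (a % 1000000007)) % 1000000007 = (2 * a) % 1000000007 :=
  (pv_modeq a).mul_left 2

theorem pv_fold_count (l : List Int) (st : Nat × Nat) :
    l.foldl (fun (st : Nat × Nat) x =>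
      if x < 0 then (st.1, st.2 + 1)
      else if x > 0 then (st.1 + 1, st.2)
      else st) st
    = (st.1 + l.countP (fun x => decide (0 < x)), st.2 + l.countP (fun x => decide (x < 0))) := by
  induction l generalizing st with
  | nil => simp
  | cons x xs ih =>
    simp only [List.foldl_cons, List.countP_cons, ih]
    rcases lt_trichotomy x 0 with h | h | h
    · simp [h, not_lt.mpr (le_of_lt h)]; omega
    · simp [h]
    · simp [h, not_lt.mpr (le_of_lt h)]; omega

theorem pv_dp_invariant (l : List Int) (p n : Nat) :
    l.foldl pvStep (pvP p n % 1000000007, pvN p n % 1000000007)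
    = (pvP (p + l.countP (fun x => decide (0 < x))) (n + l.countP (fun x => decide (x < 0))) % 1000000007,
       pvN (p + l.countP (fun x => decide (0 < x))) (n + l.countP (fun x => decide (x < 0))) % 1000000007) := by
  induction l generalizing p n with
  | nil => simp
  | cons x xs ih =>
    simp only [List.foldl_cons, List.countP_cons]
    rcases lt_trichotomy x 0 with h | h | h
    · -- negative element: (pos, neg) ← (pos+neg, pos+neg+1)
      have hx : pvStep (pvP p n % 1000000007, pvN p n % 1000000007) x
          = (pvP p (n + 1) % 1000000007, pvN p (n + 1) % 1000000007) := by
        simp only [pvStep, if_neg (by omega : ¬ x > 0), if_pos h, Prod.mk.injEq]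
        refine ⟨?_, ?_⟩
        · rw [pv_mod_emod, pv_mod_add]
          congr 1
          unfold pvP pvN
          by_cases hn : n = 0
          · simp [hn]
          · rw [if_neg hn, if_neg hn, if_neg (by omega : ¬ n + 1 = 0)]
            have : p + (n + 1) - 1 = (p + n - 1) + 1 := by omega
            rw [this, pow_succ]; ring
        · rw [pv_mod_emod, pv_mod_add1]
          congr 1
          unfold pvP pvN
          by_cases hn : n = 0
          · simp [hn]
          · rw [if_neg hn, if_neg hn, if_neg (by omega : ¬ n + 1 = 0)]
            have : p + (n + 1) - 1 = (p + n - 1) + 1 := by omega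
            rw [this, pow_succ]; ring
      rw [hx, ih]
      have c1 : (decide (0 < x)) = false := by simp [not_lt.mpr (le_of_lt h)]
      have c2 : (decide (x < 0)) = true := by simp [h]
      rw [c1, c2]
      have e : n + 1 + xs.countP (fun x => decide (x < 0))
             = n + (xs.countP (fun x => decide (x < 0)) + if true = true then 1 else 0) := by
        simp; omega
      rw [e]
      simp
    · -- zero element: state unchanged
      have hx : pvStep (pvP p n % 1000000007, pvN p n % 1000000007) x
          = (pvP p n % 1000000007, pvN p n % 1000000007) := by
        simp [pvStep, h]
      rw [hx, ih]
      simp [h]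
    · -- positive element: (pos, neg) ← (2*pos+1, 2*neg)
      have hx : pvStep (pvP p n % 1000000007, pvN p n % 1000000007) x
          = (pvP (p + 1) n % 1000000007, pvN (p + 1) n % 1000000007) := by
        simp only [pvStep, if_pos h, Prod.mk.injEq]
        refine ⟨?_, ?_⟩
        · rw [pv_mod_emod, pv_mod_two_add1]
          congr 1
          unfold pvP
          by_cases hn : n = 0
          · rw [if_pos hn, if_pos hn, pow_succ]; ring
          · rw [if_neg hn, if_neg hn]
            have : p + 1 + n - 1 = (p + n - 1) + 1 := by omega
            rw [this, pow_succ]; ring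
        · rw [pv_mod_emod, pv_mod_two]
          congr 1
          unfold pvN
          by_cases hn : n = 0
          · simp [hn]
          · rw [if_neg hn, if_neg hn]
            have : p + 1 + n - 1 = (p + n - 1) + 1 := by omega
            rw [this, pow_succ]; ring
      rw [hx, ih]
      have c1 : (decide (0 < x)) = true := by simp [h]
      have c2 : (decide (x < 0)) = false := by simp [not_lt.mpr (le_of_lt h)]
      rw [c1, c2]
      have e : p + 1 + xs.countP (fun x => decide (0 < x))
             = p + (xs.countP (fun x => decide (0 < x)) + if true = true then 1 else 0) := by
        simp; omega
      rw [e]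
      simp

-- ===== VERDICT (by name: the statement is the Claim_ definition above) =====
-- closed forms for the DP state after seeing p positives and n negatives (any zeros)
-- ===== VERDICT (by name: the statement is the Claim_ definition above) =====
theorem cntPosSS_spec : Claim_equal_cntPosSS := by
  intro ar _
  unfold Spec_cntPosSS cntPosSS cntPosSS_alt
  have h00 : ((0 : Int), (0 : Int)) = (pvP 0 0 % 1000000007, pvN 0 0 % 1000000007) := by
    simp [pvP, pvN]
  rw [h00, pv_dp_invariant]
  simp only [pv_fold_count, Nat.zero_add, pv_mod_emod]
  set p := ar.countP (fun x => decide (0 < x)) with hp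
  set n := ar.countP (fun x => decide (x < 0)) with hn
  by_cases hn0 : n = 0
  · simp [hn0, pvP]
  · rw [if_neg hn0]
    by_cases hp0 : p = 0
    · simp [hp0, pvP, hn0]
    · rw [if_neg hp0]
      unfold pvP
      rw [if_neg hn0]
      congr 1
      have h1 : p + n - 1 = p + (n - 1) := by omega
      rw [h1, pow_add]
      ring
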